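-- pv_equiv track=rewrite | github.com/usama-zk/disk-scheduling-algorithms-using | code.py | CLOOK
-- ===== SOURCE A (Python) =====
-- from copy import copy
--
-- def CLOOK(Request, Start):
--     n = len(Request)
--     Order = []
--     i = Start - 1
--     Order.append(Start)
--     while i > 0:
--         for j in range(0, n):
--             if (Request[j] == i):
--                 Order.append(i)
--         i -= 1
--
--     k = 199
--     while k > Start:
--         for l in range(0, n):
--             if (Request[l] == k):
--                 Order.append(k)
--         k -= 1
--
--     Sum = 0
--     SortedReq = copy(Order)
--     SortedReq.sort()
--     for p in range(0, len(Order) - 1):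
--         if (Order[p] != SortedReq[0]):
--             Sum += abs(Order[p] - Order[p + 1])
--     return Order, Sum
-- ===== SOURCE B (Python) =====
-- def CLOOK(Request, Start):
--     # Sort-and-filter instead of 200 rescans of Request: one pass splits the
--     # requests into the below-Start and above-Start groups, each sorted descending.
--     low = sorted((v for v in Request if 0 < v < Start), reverse=True)
--     high = sorted((v for v in Request if Start < v < 200), reverse=True)
--     Order = [Start] + low + high
--     m = min(Order)
--     Sum = sum(abs(a - b) for a, b in zip(Order, Order[1:]) if a != m)
--     return Order, Sum
-- ===== Notes on version B (the rewrite author's own statement) =====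
-- stated objective: faster
-- what changed: A rescans the whole request list once per head position (199 scans plus one per track below Start); B makes a single pass splitting requests into the below-Start and above-Start groups and sorts each descending, computing the movement sum over adjacent pairs of the resulting order.
import Mathlib
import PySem

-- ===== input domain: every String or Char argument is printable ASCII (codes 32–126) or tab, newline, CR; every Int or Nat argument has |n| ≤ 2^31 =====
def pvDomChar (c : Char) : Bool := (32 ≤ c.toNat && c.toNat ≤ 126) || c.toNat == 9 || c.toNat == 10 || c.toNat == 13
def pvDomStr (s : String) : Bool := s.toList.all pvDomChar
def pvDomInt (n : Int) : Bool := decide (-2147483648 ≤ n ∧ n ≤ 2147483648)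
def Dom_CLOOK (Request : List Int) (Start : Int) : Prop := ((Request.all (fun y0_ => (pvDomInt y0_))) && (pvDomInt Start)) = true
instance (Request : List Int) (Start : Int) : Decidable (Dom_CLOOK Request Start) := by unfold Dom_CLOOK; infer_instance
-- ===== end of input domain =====

-- B replaces A's 200 full rescans of Request (one per head position) by a single
-- filter-and-sort pass; equivalence of the return values is proved below.

-- ===== PORT A =====
-- 'while i > bound: (for j in range(0, n): if Request[j] == i: Order.append(i)); i -= 1'
-- (both of A's while loops have this shape: bound = 0 resp. bound = Start; the index
-- loop over range(0, n) is transcribed as a fold over Request — same elements, same order)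
def CLOOKwhile (Request : List Int) (bound : Int) (i : Int) (Order : List Int) : List Int :=
  if i > bound then
    CLOOKwhile Request bound (i - 1)
      (Request.foldl (fun acc x => if x = i then acc ++ [i] else acc) Order)
  else Order
termination_by (i - bound).toNat
decreasing_by omega

def CLOOK (Request : List Int) (Start : Int) : List Int × Int :=
  let Order1 := CLOOKwhile Request 0 (Start - 1) [Start]
  let Order := CLOOKwhile Request Start 199 Order1
  let SortedReq := PySem.List.sorted Order (fun x => x) false
  let Sum := (PySem.List.pyRange 0 ((Order.length : Int) - 1) 1).foldl
      (fun s p =>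
        if PySem.List.pyGetD Order p 0 ≠ PySem.List.pyGetD SortedReq 0 0 then
          s + |PySem.List.pyGetD Order p 0 - PySem.List.pyGetD Order (p + 1) 0|
        else s) 0
  (Order, Sum)

-- ===== PORT B =====
def CLOOK_alt (Request : List Int) (Start : Int) : List Int × Int :=
  let low := PySem.List.sorted (Request.filter (fun v => 0 < v && v < Start)) (fun x => x) true
  let high := PySem.List.sorted (Request.filter (fun v => Start < v && v < 200)) (fun x => x) true
  let Order := Start :: (low ++ high)
  let m := (PySem.List.min? Order (fun x => x)).getD 0
  let Sum := (((Order.zip Order.tail).filter (fun ab => ab.1 ≠ m)).map (fun ab => |ab.1 - ab.2|)).sum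
  (Order, Sum)

-- ===== PRECONDITION & SPEC =====
def Spec_CLOOK (Request : List Int) (Start : Int) (out : List Int × Int) : Prop := out = CLOOK_alt Request Start
instance (Request : List Int) (Start : Int) (out : List Int × Int) : Decidable (Spec_CLOOK Request Start out) := by unfold Spec_CLOOK; infer_instance

-- ===== CLAIM (what is proved, stated in full; the proofs are below) =====
def Claim_equal_CLOOK : Prop := ∀ (Request : List Int) (Start : Int), Dom_CLOOK Request Start → Spec_CLOOK Request Start (CLOOK Request Start)

-- ===== LEMMAS AND PROOFS =====

theorem clook_inner_eq (R : List Int) (i : Int) (acc : List Int) :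
    R.foldl (fun a x => if x = i then a ++ [i] else a) acc
      = acc ++ R.filter (fun x => x = i) := by
  induction R generalizing acc with
  | nil => simp
  | cons x xs ih =>
    simp only [List.foldl_cons, List.filter_cons]
    by_cases h : x = i
    · subst h; simp [ih]
    · simp [h, ih]

theorem clook_while_stop (R : List Int) (b i : Int) (acc : List Int) (h : ¬ i > b) :
    CLOOKwhile R b i acc = acc := by
  rw [CLOOKwhile]; simp [h]

theorem clook_while_step (R : List Int) (b i : Int) (acc : List Int) (h : i > b) :
    CLOOKwhile R b i acc
      = CLOOKwhile R b (i - 1) (R.foldl (fun a x => if x = i then a ++ [i] else a) acc) := by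
  rw [CLOOKwhile]; simp [h]

theorem clook_while_acc (R : List Int) (b i : Int) (acc : List Int) :
    CLOOKwhile R b i acc = acc ++ CLOOKwhile R b i [] := by
  generalize hn : (i - b).toNat = n
  induction n generalizing i acc with
  | zero =>
    have h : ¬ i > b := by omega
    rw [clook_while_stop R b i acc h, clook_while_stop R b i [] h, List.append_nil]
  | succ n ih =>
    have hib : i > b := by omega
    rw [clook_while_step R b i acc hib, clook_while_step R b i [] hib,
      ih (i - 1) _ (by omega), clook_inner_eq, clook_inner_eq]
    simp only [List.nil_append, List.append_assoc, List.append_cancel_left_eq]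
    exact (ih (i - 1) _ (by omega)).symm

theorem clook_while_count (R : List Int) (b i a : Int) :
    (CLOOKwhile R b i []).count a
      = if b < a ∧ a ≤ i then R.count a else 0 := by
  generalize hn : (i - b).toNat = n
  induction n generalizing i with
  | zero =>
    have h : ¬ i > b := by omega
    rw [clook_while_stop R b i [] h]
    have : ¬ (b < a ∧ a ≤ i) := by omega
    simp [this]
  | succ n ih =>
    have hib : i > b := by omega
    rw [clook_while_step R b i [] hib, clook_while_acc, clook_inner_eq, List.nil_append,
      List.count_append, ih (i - 1) (by omega)]
    by_cases hai : a = i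
    · subst hai
      rw [List.count_filter (by simp)]
      have h1 : b < a ∧ a ≤ a := ⟨hib, le_refl a⟩
      have h2 : ¬ (b < a ∧ a ≤ a - 1) := by omega
      rw [if_neg h2, if_pos h1, add_zero]
    · have hzero : (R.filter (fun x => decide (x = i))).count a = 0 := by
        refine List.count_eq_zero.mpr (fun hmem => ?_)
        have hx := List.of_mem_filter hmem
        simp at hx
        exact hai hx
      rw [hzero]
      by_cases hc : b < a ∧ a ≤ i
      · have h3 : b < a ∧ a ≤ i - 1 := by omega
        rw [if_pos h3, if_pos hc, zero_add]
      · have h3 : ¬ (b < a ∧ a ≤ i - 1) := by omega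
        rw [if_neg h3, if_neg hc, zero_add]

theorem clook_while_mem (R : List Int) (b i a : Int) (h : a ∈ CLOOKwhile R b i []) :
    b < a ∧ a ≤ i := by
  have hcnt := clook_while_count R b i a
  by_contra hc
  rw [if_neg hc] at hcnt
  have hpos := List.count_pos_iff.mpr h
  omega

theorem clook_while_pairwise (R : List Int) (b i : Int) :
    (CLOOKwhile R b i []).Pairwise (fun x y => y ≤ x) := by
  generalize hn : (i - b).toNat = n
  induction n generalizing i with
  | zero =>
    have h : ¬ i > b := by omega
    rw [clook_while_stop R b i [] h]
    exact List.Pairwise.nil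
  | succ n ih =>
    have hib : i > b := by omega
    rw [clook_while_step R b i [] hib, clook_while_acc, clook_inner_eq, List.nil_append]
    rw [List.pairwise_append]
    refine ⟨?_, ih (i - 1) (by omega), ?_⟩
    · refine List.pairwise_of_forall_mem_list ?_
      intro x hx y hy
      have hx' : x = i := by simpa using (List.of_mem_filter hx)
      have hy' : y = i := by simpa using (List.of_mem_filter hy)
      omega
    · intro x hx y hy
      have hx' : x = i := by simpa using (List.of_mem_filter hx)
      have hy' := clook_while_mem R b (i - 1) y hy
      omega

theorem clook_while_eq_sorted (R : List Int) (b i : Int) (p : Int → Bool)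
    (hp : ∀ v, p v = true ↔ (b < v ∧ v ≤ i)) :
    CLOOKwhile R b i [] = PySem.List.sorted (R.filter p) (fun x => x) true := by
  have hperm : (CLOOKwhile R b i []).Perm (PySem.List.sorted (R.filter p) (fun x => x) true) := by
    refine List.perm_iff_count.mpr (fun a => ?_)
    rw [clook_while_count, (PySem.List.sorted_perm (R.filter p) (fun x => x) true).count_eq]
    by_cases hpa : p a = true
    · rw [List.count_filter hpa]
      simp [(hp a).mp hpa]
    · have hzero : (R.filter p).count a = 0 := by
        refine List.count_eq_zero.mpr (fun hmem => ?_)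
        exact hpa (List.of_mem_filter hmem)
      have hc : ¬ (b < a ∧ a ≤ i) := fun h => hpa ((hp a).mpr h)
      simp [hzero, hc]
  exact hperm.eq_of_pairwise (fun a c _ _ h1 h2 => le_antisymm h2 h1)
    (clook_while_pairwise R b i) (PySem.List.sorted_pairwise_rev (R.filter p) (fun x => x))

-- the two Order lists coincide
theorem clook_order_eq (R : List Int) (S : Int) :
    CLOOKwhile R S 199 (CLOOKwhile R 0 (S - 1) [S])
      = S :: (PySem.List.sorted (R.filter (fun v => 0 < v && v < S)) (fun x => x) true
          ++ PySem.List.sorted (R.filter (fun v => S < v && v < 200)) (fun x => x) true) := by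
  rw [clook_while_acc, clook_while_acc R 0 (S - 1) [S],
    clook_while_eq_sorted R 0 (S - 1) (fun v => 0 < v && v < S) (by intro v; simp only [Bool.and_eq_true, decide_eq_true_eq]; omega),
    clook_while_eq_sorted R S 199 (fun v => S < v && v < 200) (by intro v; simp only [Bool.and_eq_true, decide_eq_true_eq]; omega)]
  simp

-- head of the ascending sort is Python's min
theorem clook_head_sorted_eq_min (L : List Int) (h : L ≠ []) :
    PySem.List.pyGetD (PySem.List.sorted L (fun x => x) false) 0 0
      = (PySem.List.min? L (fun x => x)).getD 0 := by
  obtain ⟨mm, hmm⟩ : ∃ mm, PySem.List.min? L (fun x => x) = some mm := by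
    cases hm : PySem.List.min? L (fun x => x) with
    | none => exact absurd ((PySem.List.min?_eq_none_iff L (fun x => x)).mp hm) h
    | some mm => exact ⟨mm, rfl⟩
  obtain ⟨x, t, hxt⟩ : ∃ x t, PySem.List.sorted L (fun x => x) false = x :: t := by
    cases hs : PySem.List.sorted L (fun x => x) false with
    | nil => exact absurd ((PySem.List.sorted_eq_nil_iff L (fun x => x) false).mp hs) h
    | cons x t => exact ⟨x, t, rfl⟩
  rw [hxt, hmm, PySem.List.pyGetD_zero_cons, Option.getD_some]
  have hxmem : x ∈ L := by
    have : x ∈ PySem.List.sorted L (fun x => x) false := by rw [hxt]; exact List.mem_cons_self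
    exact (PySem.List.mem_sorted L (fun x => x) false x).mp this
  have h1 : x ≤ mm := PySem.List.key_head_sorted_le L (fun x => x) hxt mm (PySem.List.min?_mem hmm)
  have h2 : mm ≤ x := PySem.List.min?_isMin hmm x hxmem
  omega

theorem clook_range_pairs (L : List Int) :
    (List.range (L.length - 1)).map (fun p => (L.getD p 0, L.getD (p + 1) 0))
      = L.zip L.tail := by
  induction L with
  | nil => simp
  | cons x xs ih =>
    cases xs with
    | nil => simp
    | cons y ys =>
      have hlen : (x :: y :: ys).length - 1 = (y :: ys).length - 1 + 1 := by
        simp only [List.length_cons]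
        omega
      rw [hlen, List.range_succ_eq_map, List.map_cons, List.map_map]
      have hmap : ((List.range ((y :: ys).length - 1)).map
            ((fun p => ((x :: y :: ys).getD p 0, (x :: y :: ys).getD (p + 1) 0)) ∘ Nat.succ))
          = (List.range ((y :: ys).length - 1)).map
            (fun p => ((y :: ys).getD p 0, (y :: ys).getD (p + 1) 0)) := by
        refine List.map_congr_left (fun p _ => ?_)
        simp [Function.comp]
      rw [hmap, ih]
      simp

theorem clook_foldl_ite_add {α : Type} (P : α → Prop) [DecidablePred P] (f : α → Int)
    (xs : List α) (c : Int) :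
    xs.foldl (fun s a => if P a then s + f a else s) c
      = c + (((xs.filter (fun a => P a)).map f).sum) := by
  induction xs generalizing c with
  | nil => simp
  | cons x t ih =>
    simp only [List.foldl_cons, List.filter_cons]
    by_cases h : P x
    · rw [if_pos h, ih]
      simp only [h, decide_true, if_true, List.map_cons, List.sum_cons]
      ring
    · rw [if_neg h, ih]
      simp [h]

theorem clook_pyGetD_zero_add (L : List Int) (k : Nat) (d : Int) :
    PySem.List.pyGetD L ((0 : Int) + (k : Int)) d = L.getD k d := by
  rw [zero_add, PySem.List.pyGetD_natCast]

theorem clook_pyGetD_zero_add_one (L : List Int) (k : Nat) (d : Int) :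
    PySem.List.pyGetD L ((0 : Int) + (k : Int) + 1) d = L.getD (k + 1) d := by
  have h : (0 : Int) + (k : Int) + 1 = ((k + 1 : Nat) : Int) := by push_cast; ring
  rw [h, PySem.List.pyGetD_natCast]

-- ===== VERDICT (by name: the statement is the Claim_ definition above) =====
theorem CLOOK_spec : Claim_equal_CLOOK := by
  intro Request Start _
  unfold Spec_CLOOK CLOOK CLOOK_alt
  dsimp only
  rw [clook_order_eq]
  set low := PySem.List.sorted (Request.filter (fun v => 0 < v && v < Start)) (fun x => x) true with hlow
  set high := PySem.List.sorted (Request.filter (fun v => Start < v && v < 200)) (fun x => x) true with hhigh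
  set Order := Start :: (low ++ high) with hOrder
  have hne : Order ≠ [] := by simp [hOrder]
  refine Prod.ext rfl ?_
  dsimp only
  rw [clook_head_sorted_eq_min Order hne]
  set m := (PySem.List.min? Order (fun x => x)).getD 0 with hm
  have hlen1 : 1 ≤ Order.length := by rw [hOrder]; simp
  -- turn A's pyRange fold into a fold over List.range
  rw [PySem.List.pyRange_one]
  have htoNat : ((Order.length : Int) - 1 - 0).toNat = Order.length - 1 := by omega
  rw [htoNat, List.foldl_map]
  simp only [clook_pyGetD_zero_add, clook_pyGetD_zero_add_one]
  -- fold over indices = fold over the zipped pair list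
  have hfold : (List.range (Order.length - 1)).foldl
      (fun (s : Int) (p : Nat) =>
        if Order.getD p 0 ≠ m then s + |Order.getD p 0 - Order.getD (p + 1) 0| else s) 0
    = (Order.zip Order.tail).foldl
        (fun (s : Int) ab => if ab.1 ≠ m then s + |ab.1 - ab.2| else s) 0 := by
    rw [← clook_range_pairs Order, List.foldl_map]
  rw [hfold, clook_foldl_ite_add (fun ab : Int × Int => ab.1 ≠ m) (fun ab => |ab.1 - ab.2|)]
  simp
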